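-- pv_equiv track=rewrite | github.com/kimje0322/Algorithm | 퍼즐로 배우는 알고리즘/02_파티에 참석하기 가장 좋은 시간/2-2 똑똑한 시간 확인 방법.py | chooseTime
-- ===== SOURCE A (Python) =====
-- def chooseTime(times):
--     rcount = 0
--     maxcount = time = 0
--     for t in times:
--         if t[1] == 'start':
--             rcount = rcount + 1
--         elif t[1] == 'end':
--             rcount = rcount - 1
--         if rcount > maxcount:
--             maxcount = rcount
--             time = t[0]
--     return maxcount, time
-- ===== SOURCE B (Python) =====
-- def chooseTime(times):
--     # prefix-sum decomposition: build the running-count sequence, take its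
--     # global max, then locate the first event where that max is reached
--     running = []
--     c = 0
--     for t in times:
--         if t[1] == 'start':
--             c = c + 1
--         elif t[1] == 'end':
--             c = c - 1
--         running.append(c)
--     m = max(running, default=0)
--     if m <= 0:
--         return 0, 0
--     for cnt, t in zip(running, times):
--         if cnt == m:
--             return m, t[0]
-- ===== Notes on version B (the rewrite author's own statement) =====
-- stated objective: alternative
-- what changed: Replaces the single stateful scan that tracks (rcount, maxcount, time) with strict-exceedance updates by a prefix-sum decomposition: build the running-count list, take its global max (default 0), then find the first event whose running count equals that max.
import Mathlib
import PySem

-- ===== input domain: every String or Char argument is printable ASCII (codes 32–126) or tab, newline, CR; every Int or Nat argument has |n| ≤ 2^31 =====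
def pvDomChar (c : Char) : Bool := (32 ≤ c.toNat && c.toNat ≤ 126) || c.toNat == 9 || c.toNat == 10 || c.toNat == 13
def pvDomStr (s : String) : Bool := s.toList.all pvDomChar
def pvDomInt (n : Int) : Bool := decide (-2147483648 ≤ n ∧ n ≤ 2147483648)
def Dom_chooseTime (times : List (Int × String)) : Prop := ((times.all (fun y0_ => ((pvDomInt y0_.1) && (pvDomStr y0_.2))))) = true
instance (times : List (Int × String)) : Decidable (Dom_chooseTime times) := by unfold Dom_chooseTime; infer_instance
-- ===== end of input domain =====

-- B replaces A's single stateful max-tracking scan by a prefix-sum decomposition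
-- (running counts, global max, first index attaining it); alternative, same cost.


-- ===== PORT A =====
-- one pass with state (rcount, maxcount, time); update maxcount/time on strict exceedance
def chooseTimeStep (st : Int × Int × Int) (t : Int × String) : Int × Int × Int :=
  let rcount := if t.2 == "start" then st.1 + 1 else if t.2 == "end" then st.1 - 1 else st.1
  if rcount > st.2.1 then (rcount, rcount, t.1) else (rcount, st.2.1, st.2.2)

def chooseTime (times : List (Int × String)) : Int × Int :=
  let st := times.foldl chooseTimeStep (0, 0, 0)
  (st.2.1, st.2.2)

-- ===== PORT B =====
def chooseTimeDelta (tag : String) : Int :=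
  if tag == "start" then 1 else if tag == "end" then -1 else 0

-- the running-count (prefix-sum) list, starting from count c
def chooseTimeRuns (times : List (Int × String)) (c : Int) : List Int :=
  match times with
  | [] => []
  | t :: ts => (c + chooseTimeDelta t.2) :: chooseTimeRuns ts (c + chooseTimeDelta t.2)

-- the final 'for cnt, t in zip(running, times): if cnt == m: return m, t[0]' loop
def chooseTimeFind (m : Int) (zs : List (Int × (Int × String))) : Int × Int :=
  match zs with
  | [] => (m, 0)          -- unreachable when m occurs in the running counts
  | (cnt, t) :: rest => if cnt == m then (m, t.1) else chooseTimeFind m rest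

def chooseTime_alt (times : List (Int × String)) : Int × Int :=
  let running := chooseTimeRuns times 0
  match PySem.List.max? running (fun y => y) with
  | none => (0, 0)
  | some m => if m ≤ 0 then (0, 0) else chooseTimeFind m (running.zip times)

-- ===== PRECONDITION & SPEC =====
def Spec_chooseTime (times : List (Int × String)) (out : Int × Int) : Prop := out = chooseTime_alt times
instance (times : List (Int × String)) (out : Int × Int) : Decidable (Spec_chooseTime times out) := by unfold Spec_chooseTime; infer_instance

-- ===== CLAIM (what is proved, stated in full; the proofs are below) =====
def Claim_equal_chooseTime : Prop := ∀ (times : List (Int × String)), Dom_chooseTime times → Spec_chooseTime times (chooseTime times)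

-- ===== LEMMAS AND PROOFS =====

-- the shape B computes, generalised over A's loop state (r, m, t0)
def chooseTimeRhs (times : List (Int × String)) (r m t0 : Int) : Int × Int :=
  let running := chooseTimeRuns times r
  match PySem.List.max? running (fun y => y) with
  | none => (m, t0)
  | some M => if M ≤ m then (m, t0) else chooseTimeFind M (running.zip times)

theorem chooseTime_foldl_max_max (xs : List Int) :
    ∀ a b : Int, List.foldl max (max a b) xs = max a (List.foldl max b xs) := by
  induction xs with
  | nil => intro a b; rfl
  | cons x xs ih =>
      intro a b
      simp only [List.foldl]
      rw [max_assoc]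
      exact ih a (max b x)

theorem chooseTime_main (times : List (Int × String)) :
    ∀ (r m t0 : Int), r ≤ m →
      (let st := times.foldl chooseTimeStep (r, m, t0); (st.2.1, st.2.2))
        = chooseTimeRhs times r m t0 := by
  induction times with
  | nil =>
      intro r m t0 _
      simp [chooseTimeRhs, chooseTimeRuns, PySem.List.max?]
  | cons t ts ih =>
      intro r m t0 hrm
      have hstep : chooseTimeStep (r, m, t0) t =
          (if (r + chooseTimeDelta t.2) > m
            then (r + chooseTimeDelta t.2, r + chooseTimeDelta t.2, t.1)
            else (r + chooseTimeDelta t.2, m, t0)) := by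
        simp only [chooseTimeStep, chooseTimeDelta]
        by_cases h1 : t.2 == "start" <;> by_cases h2 : t.2 == "end" <;>
          simp [h1, h2, sub_eq_add_neg]
      set r' := r + chooseTimeDelta t.2 with hr'
      have hmax : PySem.List.max? (r' :: chooseTimeRuns ts r') (fun y => y)
          = some ((chooseTimeRuns ts r').foldl max r') := PySem.List.max?_id_cons _ _
      set M := (chooseTimeRuns ts r').foldl max r' with hM
      have hrhs : chooseTimeRhs (t :: ts) r m t0 =
          (if M ≤ m then (m, t0)
            else chooseTimeFind M ((r' :: chooseTimeRuns ts r').zip (t :: ts))) := by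
        show (match PySem.List.max? (r' :: chooseTimeRuns ts r') (fun y => y) with
              | none => (m, t0)
              | some M => if M ≤ m then (m, t0)
                  else chooseTimeFind M ((r' :: chooseTimeRuns ts r').zip (t :: ts)))
            = _
        rw [hmax]
      rw [hrhs]
      show (let st := List.foldl chooseTimeStep (chooseTimeStep (r, m, t0) t) ts;
            (st.2.1, st.2.2)) = _
      rw [hstep]
      rcases hq : chooseTimeRuns ts r' with _ | ⟨x, xs⟩
      · -- tail of running counts is empty: M = r'
        have hM' : M = r' := by rw [hM, hq]; rfl
        by_cases hgt : m < r'
        · rw [if_pos hgt]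
          have hih := ih r' r' t.1 le_rfl
          rw [hih]
          have : chooseTimeRhs ts r' r' t.1 = (r', t.1) := by
            simp [chooseTimeRhs, hq, PySem.List.max?]
          rw [this, hM', if_neg (not_le.mpr hgt)]
          simp [chooseTimeFind]
        · rw [if_neg hgt]
          have hih := ih r' m t0 (not_lt.mp hgt)
          rw [hih]
          have : chooseTimeRhs ts r' m t0 = (m, t0) := by
            simp [chooseTimeRhs, hq, PySem.List.max?]
          rw [this, hM', if_pos (not_lt.mp hgt)]
      · -- tail of running counts is x :: xs, with max Mt
        set Mt := List.foldl max x xs with hMtdef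
        have hMt : PySem.List.max? (chooseTimeRuns ts r') (fun y => y) = some Mt := by
          rw [hq]; exact PySem.List.max?_id_cons _ _
        have hMmax : M = max r' Mt := by
          rw [hM, hq]
          show List.foldl max (max r' x) xs = max r' (List.foldl max x xs)
          exact chooseTime_foldl_max_max xs r' x
        by_cases hgt : m < r'
        · rw [if_pos hgt]
          have hih := ih r' r' t.1 le_rfl
          rw [hih]
          have hrhs2 : chooseTimeRhs ts r' r' t.1 =
              (if Mt ≤ r' then (r', t.1)
                else chooseTimeFind Mt ((chooseTimeRuns ts r').zip ts)) := by
            show (match PySem.List.max? (chooseTimeRuns ts r') (fun y => y) with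
                  | none => (r', t.1)
                  | some M => if M ≤ r' then (r', t.1)
                      else chooseTimeFind M ((chooseTimeRuns ts r').zip ts)) = _
            rw [hMt]
          rw [hrhs2]
          by_cases hle : Mt ≤ r'
          · have hMr : M = r' := by rw [hMmax]; exact max_eq_left hle
            rw [if_pos hle, hMr, if_neg (not_le.mpr hgt), List.zip_cons_cons]
            simp [chooseTimeFind]
          · have hMr : M = Mt := by rw [hMmax]; exact max_eq_right (le_of_lt (not_le.mp hle))
            have hMm : ¬ M ≤ m := by
              rw [hMr]; exact not_le.mpr (lt_trans hgt (not_le.mp hle))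
            rw [if_neg hle, if_neg hMm, List.zip_cons_cons]
            rw [hMr]
            have hne : r' ≠ Mt := ne_of_lt (not_le.mp hle)
            simp [chooseTimeFind, hne]
            rw [hq]
        · rw [if_neg hgt]
          have hr'm : r' ≤ m := not_lt.mp hgt
          have hih := ih r' m t0 hr'm
          rw [hih]
          have hrhs2 : chooseTimeRhs ts r' m t0 =
              (if Mt ≤ m then (m, t0)
                else chooseTimeFind Mt ((chooseTimeRuns ts r').zip ts)) := by
            show (match PySem.List.max? (chooseTimeRuns ts r') (fun y => y) with
                  | none => (m, t0)
                  | some M => if M ≤ m then (m, t0)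
                      else chooseTimeFind M ((chooseTimeRuns ts r').zip ts)) = _
            rw [hMt]
          rw [hrhs2]
          by_cases hle : Mt ≤ m
          · have hMm : M ≤ m := by rw [hMmax]; exact max_le hr'm hle
            rw [if_pos hle, if_pos hMm]
          · have hMr : M = Mt := by
              rw [hMmax]
              exact max_eq_right (le_trans hr'm (le_of_lt (not_le.mp hle)))
            have hMm : ¬ M ≤ m := by rw [hMr]; exact hle
            rw [if_neg hle, if_neg hMm, List.zip_cons_cons]
            rw [hMr]
            have hne : r' ≠ Mt := ne_of_lt (lt_of_le_of_lt hr'm (not_le.mp hle))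
            simp [chooseTimeFind, hne]
            rw [hq]

-- ===== VERDICT (by name: the statement is the Claim_ definition above) =====
theorem chooseTime_spec : Claim_equal_chooseTime := by
  intro times _
  unfold Spec_chooseTime chooseTime chooseTime_alt
  have h := chooseTime_main times 0 0 0 le_rfl
  rw [h]
  unfold chooseTimeRhs
  rcases hmx : PySem.List.max? (chooseTimeRuns times 0) (fun y => y) with _ | m <;> simp [hmx]
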